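-- pv_equiv track=rewrite | github.com/jaseempaloth/Leetcode_repo | dynamic programming /solving_questions_with_brainpower.py | most_points
-- ===== SOURCE A (Python) =====
-- def most_points(questions: list[list[int]]) -> int:
--     dp = {}
--     for i in range(len(questions) - 1, -1, -1):
--         dp[i] = max(
--             questions[i][0] + dp.get(i + 1 + questions[i][1], 0),
--             dp.get(i + 1, 0)
--         )
--     return dp[0]
-- ===== SOURCE B (Python) =====
-- def most_points(questions: list[list[int]]) -> int:
--     # Forward "push" DP over an array: propagate each prefix-best to its successors.
--     n = len(questions)
--     dp = [0] * (n + 1)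
--     for i in range(n):
--         if dp[i] > dp[i + 1]:
--             dp[i + 1] = dp[i]
--         j = i + 1 + questions[i][1]
--         if j < i + 1 or j > n:
--             # a jump that leaves the range of questions ends the exam
--             j = n
--         v = dp[i] + questions[i][0]
--         if v > dp[j]:
--             dp[j] = v
--     return dp[n]
-- ===== Notes on version B (the rewrite author's own statement) =====
-- stated objective: alternative
-- what changed: A's backward pull-from-the-future dictionary DP (dp[i] from dp.get of later keys, iterating n-1..0) is replaced by a forward push DP over a flat (n+1)-array that propagates each prefix value to its skip- and answer-successors and reads the answer at dp[n].
import Mathlib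
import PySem

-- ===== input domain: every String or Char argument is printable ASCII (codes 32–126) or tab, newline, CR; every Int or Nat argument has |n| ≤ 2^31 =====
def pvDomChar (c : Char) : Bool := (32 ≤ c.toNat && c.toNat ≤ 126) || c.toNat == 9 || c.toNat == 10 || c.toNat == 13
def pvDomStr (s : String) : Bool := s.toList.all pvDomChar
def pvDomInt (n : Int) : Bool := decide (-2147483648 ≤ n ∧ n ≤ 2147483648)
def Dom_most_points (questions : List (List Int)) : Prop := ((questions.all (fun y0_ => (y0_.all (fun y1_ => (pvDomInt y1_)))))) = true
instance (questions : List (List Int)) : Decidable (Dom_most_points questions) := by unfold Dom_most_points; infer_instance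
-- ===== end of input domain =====

-- B replaces A's backward pull-from-the-future dictionary DP by a forward push DP over a
-- flat array (each prefix value is pushed to its skip- and answer-successors); same values,
-- different decomposition.

-- ===== PORT A =====
def most_points (questions : List (List Int)) : Int :=
  let dp := (PySem.List.pyRange ((questions.length : Int) - 1) (-1) (-1)).foldl
    (fun dp i =>
      let qi := PySem.List.pyGetD questions i []
      dp.insert i (max (PySem.List.pyGetD qi 0 0 + dp.getD (i + 1 + PySem.List.pyGetD qi 1 0) 0)
                       (dp.getD (i + 1) 0)))
    PySem.Dict.empty
  (dp.get? 0).getD 0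

-- ===== PORT B =====
def most_points_alt (questions : List (List Int)) : Int :=
  let n := questions.length
  let dp := (List.range n).foldl
    (fun (dp : List Int) (i : Nat) =>
      let dp1 := if dp.getD i 0 > dp.getD (i + 1) 0 then dp.set (i + 1) (dp.getD i 0) else dp
      let t : Int := (i : Int) + 1 + (questions.getD i []).getD 1 0
      let j : Nat := if (i : Int) + 1 ≤ t ∧ t ≤ (n : Int) then t.toNat else n
      let v := dp1.getD i 0 + (questions.getD i []).getD 0 0
      if v > dp1.getD j 0 then dp1.set j v else dp1)
    (List.replicate (n + 1) 0)
  dp.getD n 0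

-- ===== PRECONDITION & SPEC =====
-- Pre_ excludes exactly the inputs on which the Python A raises: the empty list (KeyError 0)
-- and lists containing a row of fewer than 2 entries (IndexError).
def Pre_most_points (questions : List (List Int)) : Prop :=
  questions ≠ [] ∧ ∀ q ∈ questions, 2 ≤ q.length
instance (questions : List (List Int)) : Decidable (Pre_most_points questions) := by
  unfold Pre_most_points; infer_instance
def pvWitness_most_points : List (List Int) := [[1, 0], [3, 2], [2, 1]]

def Spec_most_points (questions : List (List Int)) (out : Int) : Prop := out = most_points_alt questions
instance (questions : List (List Int)) (out : Int) : Decidable (Spec_most_points questions out) := by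
  unfold Spec_most_points; infer_instance

-- ===== CLAIM (what is proved, stated in full; the proofs are below) =====
def Claim_equal_most_points : Prop := ∀ (questions : List (List Int)), Dom_most_points questions → Pre_most_points questions → Spec_most_points questions (most_points questions)

-- ===== LEMMAS AND PROOFS =====

-- the points / brainpower of question i, read the way both ports read them
def pvP (qs : List (List Int)) (i : Nat) : Int := (qs.getD i []).getD 0 0
def pvB (qs : List (List Int)) (i : Nat) : Int := (qs.getD i []).getD 1 0

-- the index the exam continues at after answering question i ("leaves the range" ⇒ end = length)
def pvJ (qs : List (List Int)) (i : Nat) : Nat :=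
  if (i : Int) + 1 ≤ (i : Int) + 1 + pvB qs i ∧ (i : Int) + 1 + pvB qs i ≤ (qs.length : Int)
  then ((i : Int) + 1 + pvB qs i).toNat else qs.length

theorem pvJ_bounds (qs : List (List Int)) (i : Nat) (h : i < qs.length) :
    i < pvJ qs i ∧ pvJ qs i ≤ qs.length := by
  unfold pvJ; split_ifs with h' <;> omega

-- the backward DP value: best score obtainable from question i on
def pvM (qs : List (List Int)) (i : Nat) : Int :=
  if h : i < qs.length then
    max (pvP qs i + pvM qs (pvJ qs i)) (pvM qs (i + 1))
  else 0
termination_by qs.length - i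
decreasing_by
  · have h2 := pvJ_bounds qs i h; omega
  · omega

theorem pvM_of_ge (qs : List (List Int)) (i : Nat) (h : qs.length ≤ i) : pvM qs i = 0 := by
  rw [pvM]; rw [dif_neg]; omega

theorem pvM_of_lt (qs : List (List Int)) (i : Nat) (h : i < qs.length) :
    pvM qs i = max (pvP qs i + pvM qs (pvJ qs i)) (pvM qs (i + 1)) := by
  rw [pvM]; rw [dif_pos h]

theorem pvM_succ_le (qs : List (List Int)) (i : Nat) : pvM qs (i + 1) ≤ pvM qs i := by
  by_cases h : i < qs.length
  · rw [pvM_of_lt qs i h]; exact le_max_right _ _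
  · rw [pvM_of_ge qs i (by omega), pvM_of_ge qs (i + 1) (by omega)]

theorem pvM_le (qs : List (List Int)) {i j : Nat} (h : i ≤ j) : pvM qs j ≤ pvM qs i := by
  induction j, h using Nat.le_induction with
  | base => exact le_refl _
  | succ k hk ih => exact le_trans (pvM_succ_le qs k) ih

theorem pvM_answer_le (qs : List (List Int)) (i : Nat) (h : i < qs.length) :
    pvP qs i + pvM qs (pvJ qs i) ≤ pvM qs i := by
  rw [pvM_of_lt qs i h]; exact le_max_left _ _

-- getD after set, with default 0
theorem pvGetD_set (xs : List Int) (j k : Nat) (v : Int) :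
    (xs.set j v).getD k 0 = if j = k ∧ j < xs.length then v else xs.getD k 0 := by
  simp only [List.getD_eq_getElem?_getD, List.getElem?_set]
  by_cases h1 : j = k
  · subst h1; by_cases h2 : j < xs.length <;> simp [h2]
  · simp [h1]

-- ---------- Part A : the backward dict DP computes pvM ----------

-- port A's loop body, named for the proofs (pvG_app below restates it over Nat indices)
def pvG (qs : List (List Int)) (dp : PySem.Dict Int Int) (i : Int) : PySem.Dict Int Int :=
  let qi := PySem.List.pyGetD qs i []
  dp.insert i (max (PySem.List.pyGetD qi 0 0 + dp.getD (i + 1 + PySem.List.pyGetD qi 1 0) 0)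
                   (dp.getD (i + 1) 0))

theorem pvA_fold (qs : List (List Int)) :
    most_points qs
      = (((PySem.List.pyRange ((qs.length : Int) - 1) (-1) (-1)).foldl (pvG qs)
          PySem.Dict.empty).get? 0).getD 0 := rfl

theorem pvRange_down (n : Nat) :
    PySem.List.pyRange ((n:Int) - 1) (-1) (-1)
      = (List.range n).map (fun k : Nat => (n:Int) - 1 - (k:Int)) := by
  by_cases h : n = 0
  · subst h; decide
  · have h1 : (-1 : Int) < (n:Int) - 1 := by omega
    have h2 : ¬ ((0:Int) < -1) := by omega
    simp only [PySem.List.pyRange, if_neg (by omega : ¬ (-1:Int) = 0), if_neg h2, if_pos h1]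
    have h3 : ((n:Int) - 1 - -1 + - -1 - 1) / - -1 = (n:Int) := by norm_num
    rw [h3, Int.toNat_natCast]
    exact List.map_congr_left (fun k _ => by ring)

theorem pvG_app (qs : List (List Int)) (d : PySem.Dict Int Int) (i' : Nat) :
    pvG qs d ((i' : Int))
      = d.insert (i' : Int)
          (max (pvP qs i' + d.getD ((i' : Int) + 1 + pvB qs i') 0) (d.getD ((i' : Int) + 1) 0)) := by
  unfold pvG pvP pvB
  rw [PySem.List.pyGetD_natCast]
  simp only [PySem.List.pyGetD_ofNat']

theorem pvA_inv (qs : List (List Int)) : ∀ m, m ≤ qs.length → ∀ x : Int,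
    ((List.range m).foldl (fun d (k : Nat) => pvG qs d ((qs.length:Int) - 1 - (k:Int)))
        PySem.Dict.empty).get? x
      = if ((qs.length:Int) - m ≤ x ∧ x < (qs.length:Int)) then some (pvM qs x.toNat) else none := by
  intro m
  induction m with
  | zero =>
    intro _ x
    rw [List.range_zero, List.foldl_nil, PySem.Dict.get?_empty, if_neg (by push_cast; omega)]
  | succ m ih =>
    intro hm x
    rw [List.range_succ, List.foldl_append, List.foldl_cons, List.foldl_nil]
    set i' : Nat := qs.length - 1 - m with hi'
    have hc : ((qs.length:Int) - 1 - (m:Int)) = ((i' : Nat) : Int) := by omega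
    rw [hc, pvG_app]
    have hA : PySem.Dict.getD ((List.range m).foldl
          (fun d (k : Nat) => pvG qs d ((qs.length:Int) - 1 - (k:Int))) PySem.Dict.empty)
          ((i':Int) + 1 + pvB qs i') 0 = pvM qs (pvJ qs i') := by
      simp only [PySem.Dict.getD, ih (by omega)]
      by_cases c1 : ((qs.length:Int) - (m:Int) ≤ (i':Int) + 1 + pvB qs i' ∧
          (i':Int) + 1 + pvB qs i' < (qs.length:Int))
      · rw [if_pos c1]
        unfold pvJ
        rw [if_pos (by omega)]
        rfl
      · rw [if_neg c1]
        unfold pvJ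
        split_ifs with c2
        · rw [show ((i':Int) + 1 + pvB qs i').toNat = qs.length from by omega,
              pvM_of_ge qs _ le_rfl]
          rfl
        · rw [pvM_of_ge qs _ le_rfl]
          rfl
    have hB : PySem.Dict.getD ((List.range m).foldl
          (fun d (k : Nat) => pvG qs d ((qs.length:Int) - 1 - (k:Int))) PySem.Dict.empty)
          ((i':Int) + 1) 0 = pvM qs (i' + 1) := by
      simp only [PySem.Dict.getD, ih (by omega)]
      by_cases c : ((qs.length:Int) - (m:Int) ≤ (i':Int) + 1 ∧ (i':Int) + 1 < (qs.length:Int))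
      · rw [if_pos c, Option.getD_some, show ((i':Int) + 1).toNat = i' + 1 from by omega]
      · rw [if_neg c, pvM_of_ge qs (i' + 1) (by omega)]
        rfl
    rw [hA, hB, PySem.Dict.get?_insert]
    by_cases hx : x = (i':Int)
    · rw [if_pos hx, if_pos (by omega), show x.toNat = i' from by omega,
          pvM_of_lt qs i' (by omega)]
    · rw [if_neg hx]
      rw [ih (by omega) x]
      by_cases co : ((qs.length:Int) - (m:Int) ≤ x ∧ x < (qs.length:Int))
      · rw [if_pos co, if_pos (by omega)]
      · rw [if_neg co, if_neg ?_]
        intro hnew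
        exact hx (by omega)

theorem pvA_eq (qs : List (List Int)) (h : qs ≠ []) : most_points qs = pvM qs 0 := by
  have hn : 0 < qs.length := List.length_pos_iff.mpr h
  rw [pvA_fold, pvRange_down, List.foldl_map, pvA_inv qs qs.length le_rfl 0]
  rw [if_pos (by constructor <;> omega)]
  rfl

-- ---------- Part B : the forward push DP computes pvM 0 ----------

-- 'relax': raise position j to v if that increases it
def pvRelax (dp : List Int) (j : Nat) (v : Int) : List Int :=
  if v > dp.getD j 0 then dp.set j v else dp

-- port B's loop body, named for the proofs
def pvF (qs : List (List Int)) (dp : List Int) (i : Nat) : List Int :=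
  pvRelax (pvRelax dp (i + 1) (dp.getD i 0)) (pvJ qs i)
    ((pvRelax dp (i + 1) (dp.getD i 0)).getD i 0 + pvP qs i)

theorem pvB_fold (qs : List (List Int)) :
    most_points_alt qs
      = ((List.range qs.length).foldl (pvF qs)
          (List.replicate (qs.length + 1) 0)).getD qs.length 0 := rfl

theorem pvRelax_length (dp : List Int) (j : Nat) (v : Int) :
    (pvRelax dp j v).length = dp.length := by
  unfold pvRelax; split_ifs <;> simp

theorem pvRelax_getD (dp : List Int) (j : Nat) (v : Int) (hj : j < dp.length) (k : Nat) :
    (pvRelax dp j v).getD k 0 = if j = k then max (dp.getD j 0) v else dp.getD k 0 := by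
  unfold pvRelax
  by_cases h2 : j = k
  · subst h2
    split_ifs with h1
    · rw [pvGetD_set, if_pos ⟨rfl, hj⟩]; omega
    all_goals omega
  · split_ifs with h1
    · rw [pvGetD_set, if_neg (by tauto)]
    · rfl

theorem pvF_step (qs : List (List Int)) (dp : List Int) (i : Nat)
    (hlen : dp.length = qs.length + 1) (hi : i < qs.length)
    (hub : ∀ k, i ≤ k → k ≤ qs.length → dp.getD k 0 + pvM qs k ≤ pvM qs 0)
    (hex : ∃ k, i ≤ k ∧ k ≤ qs.length ∧ dp.getD k 0 + pvM qs k = pvM qs 0) :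
    (pvF qs dp i).length = qs.length + 1 ∧
    (∀ k, i + 1 ≤ k → k ≤ qs.length → (pvF qs dp i).getD k 0 + pvM qs k ≤ pvM qs 0) ∧
    (∃ k, i + 1 ≤ k ∧ k ≤ qs.length ∧ (pvF qs dp i).getD k 0 + pvM qs k = pvM qs 0) := by
  have hjb := pvJ_bounds qs i hi
  have h1 : i + 1 < dp.length := by omega
  have hd1len : (pvRelax dp (i + 1) (dp.getD i 0)).length = dp.length := pvRelax_length _ _ _
  have hd1 : ∀ k, (pvRelax dp (i + 1) (dp.getD i 0)).getD k 0
      = if i + 1 = k then max (dp.getD (i + 1) 0) (dp.getD i 0) else dp.getD k 0 :=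
    fun k => pvRelax_getD dp (i + 1) (dp.getD i 0) h1 k
  have hvi : (pvRelax dp (i + 1) (dp.getD i 0)).getD i 0 = dp.getD i 0 := by
    rw [hd1 i, if_neg (by omega)]
  have hF : ∀ k, (pvF qs dp i).getD k 0
      = if pvJ qs i = k
        then max (if i + 1 = k then max (dp.getD (i + 1) 0) (dp.getD i 0) else dp.getD k 0)
                 (dp.getD i 0 + pvP qs i)
        else if i + 1 = k then max (dp.getD (i + 1) 0) (dp.getD i 0) else dp.getD k 0 := by
    intro k
    unfold pvF
    rw [pvRelax_getD _ _ _ (by omega) k, hvi]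
    by_cases hjk : pvJ qs i = k
    · rw [if_pos hjk, if_pos hjk, hd1 (pvJ qs i), hjk]
    · rw [if_neg hjk, if_neg hjk, hd1 k]
  have hFlen : (pvF qs dp i).length = qs.length + 1 := by
    unfold pvF; rw [pvRelax_length, pvRelax_length, hlen]
  have hubi := hub i le_rfl (by omega)
  have key1 : dp.getD i 0 + pvM qs (i + 1) ≤ pvM qs 0 := by
    have := pvM_succ_le qs i; omega
  have key2 : dp.getD i 0 + pvP qs i + pvM qs (pvJ qs i) ≤ pvM qs 0 := by
    have := pvM_answer_le qs i hi; omega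
  have hub' : ∀ k, i + 1 ≤ k → k ≤ qs.length → (pvF qs dp i).getD k 0 + pvM qs k ≤ pvM qs 0 := by
    intro k hk1 hk2
    have hk := hub k (by omega) hk2
    rw [hF k]
    split_ifs with e1 e2 e3
    · -- k = pvJ = i+1
      subst e2
      rw [← max_add_add_right, ← max_add_add_right, max_le_iff, max_le_iff]
      refine ⟨⟨hk, key1⟩, ?_⟩
      rw [e1] at key2; omega
    · -- k = pvJ ≠ i+1
      rw [← max_add_add_right, max_le_iff]
      refine ⟨hk, ?_⟩
      rw [e1] at key2; omega
    · -- k = i+1 ≠ pvJ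
      subst e3
      rw [← max_add_add_right, max_le_iff]
      exact ⟨hk, key1⟩
    · exact hk
  refine ⟨hFlen, hub', ?_⟩
  obtain ⟨k0, hk01, hk02, hk0e⟩ := hex
  by_cases hk0i : i + 1 ≤ k0
  · -- the old witness survives: entries only grow
    refine ⟨k0, hk0i, hk02, le_antisymm (hub' k0 hk0i hk02) ?_⟩
    have hge : dp.getD k0 0 ≤ (pvF qs dp i).getD k0 0 := by
      rw [hF k0]
      split_ifs with e1 e2 e3
      · rw [← e2]; exact le_trans (le_max_left _ _) (le_max_left _ _)
      · exact le_max_left _ _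
      · rw [← e3]; exact le_max_left _ _
      · exact le_rfl
    omega
  · -- the witness was i itself: it moved to i+1 or to pvJ i
    rw [show k0 = i from by omega] at hk0e
    rw [pvM_of_lt qs i hi] at hk0e
    rcases max_choice (pvP qs i + pvM qs (pvJ qs i)) (pvM qs (i + 1)) with hmax | hmax
    · -- answering i is optimal: witness pvJ i
      refine ⟨pvJ qs i, by omega, by omega,
        le_antisymm (hub' _ (by omega) (by omega)) ?_⟩
      have hge : dp.getD i 0 + pvP qs i ≤ (pvF qs dp i).getD (pvJ qs i) 0 := by
        rw [hF (pvJ qs i), if_pos rfl]; exact le_max_right _ _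
      rw [hmax] at hk0e; omega
    · -- skipping i is optimal: witness i+1
      refine ⟨i + 1, le_rfl, by omega,
        le_antisymm (hub' _ le_rfl (by omega)) ?_⟩
      have hge : dp.getD i 0 ≤ (pvF qs dp i).getD (i + 1) 0 := by
        rw [hF (i + 1)]
        split_ifs with e1 e2 e3
        · exact le_trans (le_max_right _ _) (le_max_left _ _)
        · omega
        · exact le_max_right _ _
        · omega
      rw [hmax] at hk0e; omega

theorem pvB_inv (qs : List (List Int)) : ∀ m, m ≤ qs.length →
    (((List.range m).foldl (pvF qs) (List.replicate (qs.length + 1) 0)).length = qs.length + 1) ∧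
    (∀ k, m ≤ k → k ≤ qs.length →
      ((List.range m).foldl (pvF qs) (List.replicate (qs.length + 1) 0)).getD k 0 + pvM qs k ≤ pvM qs 0) ∧
    (∃ k, m ≤ k ∧ k ≤ qs.length ∧
      ((List.range m).foldl (pvF qs) (List.replicate (qs.length + 1) 0)).getD k 0 + pvM qs k = pvM qs 0) := by
  intro m
  induction m with
  | zero =>
    intro _
    have hz : ∀ k, (List.replicate (qs.length + 1) (0:Int)).getD k 0 = 0 := by
      intro k
      simp only [List.getD_eq_getElem?_getD, List.getElem?_replicate]
      split_ifs <;> rfl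
    refine ⟨by simp, ?_, ⟨0, le_rfl, Nat.zero_le _, ?_⟩⟩
    · intro k _ _
      simp only [List.foldl_nil, List.range_zero, hz k]
      have := pvM_le qs (Nat.zero_le k); omega
    · simp only [List.foldl_nil, List.range_zero, hz 0]; omega
  | succ m ih =>
    intro hm
    obtain ⟨hl, hu, he⟩ := ih (by omega)
    rw [List.range_succ, List.foldl_append, List.foldl_cons, List.foldl_nil]
    exact pvF_step qs _ m hl (by omega) hu he

theorem pvB_eq (qs : List (List Int)) : most_points_alt qs = pvM qs 0 := by
  obtain ⟨hl, hu, k, hk1, hk2, he⟩ := pvB_inv qs qs.length le_rfl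
  have hk : k = qs.length := by omega
  subst hk
  rw [pvB_fold]
  rw [pvM_of_ge qs qs.length le_rfl] at he
  omega

-- ===== VERDICT (by name: the statement is the Claim_ definition above) =====
theorem most_points_spec : Claim_equal_most_points := by
  intro qs _ hpre
  unfold Spec_most_points
  rw [pvA_eq qs hpre.1, pvB_eq qs]
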